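-- pv_equiv track=rewrite | github.com/kdairatchi/liffy | url_gatherer.py | _check_lfi_parameters
-- ===== SOURCE A (Python) =====
-- from typing import List, Dict, Set, Optional, Tuple
--
-- def _check_lfi_parameters(parameters: Dict[str, List[str]]) -> bool:
--     """Check if parameters might be vulnerable to LFI"""
--     lfi_keywords = [
--         'file', 'page', 'path', 'include', 'require', 'view', 'template',
--         'doc', 'document', 'folder', 'dir', 'directory', 'read', 'load',
--         'show', 'display', 'content', 'data', 'src', 'source'
--     ]
--
--     for param_name in parameters.keys():
--         if any(keyword in param_name.lower() for keyword in lfi_keywords):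
--             return True
--
--     return False
-- ===== SOURCE B (Python) =====
-- def _check_lfi_parameters(parameters):
--     """Check if parameters might be vulnerable to LFI"""
--     lfi_keywords = [
--         'file', 'page', 'path', 'include', 'require', 'view', 'template',
--         'doc', 'document', 'folder', 'dir', 'directory', 'read', 'load',
--         'show', 'display', 'content', 'data', 'src', 'source'
--     ]
--     # First-letter dispatch index: keyword candidates grouped by their first character.
--     by_first = {}
--     for c, kw in [(kw[0], kw) for kw in lfi_keywords]:
--         by_first[c] = by_first.get(c, []) + [kw]
--     # Single left-to-right pass over each lowered name: at each position, only the
--     # keywords starting with that character are tried as a prefix match.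
--     for name in parameters:
--         low = name.lower()
--         for i, ch in enumerate(low):
--             for kw in by_first.get(ch, []):
--                 if low.startswith(kw, i):
--                     return True
--     return False
-- ===== Notes on version B (the rewrite author's own statement) =====
-- stated objective: alternative
-- what changed: B replaces A's per-name loop over all 20 keyword substring searches by a first-letter dispatch dict (keywords grouped by initial character) and a single left-to-right positional scan of each lowered name, prefix-testing only the keywords dispatched by the character at each position.
import Mathlib
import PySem

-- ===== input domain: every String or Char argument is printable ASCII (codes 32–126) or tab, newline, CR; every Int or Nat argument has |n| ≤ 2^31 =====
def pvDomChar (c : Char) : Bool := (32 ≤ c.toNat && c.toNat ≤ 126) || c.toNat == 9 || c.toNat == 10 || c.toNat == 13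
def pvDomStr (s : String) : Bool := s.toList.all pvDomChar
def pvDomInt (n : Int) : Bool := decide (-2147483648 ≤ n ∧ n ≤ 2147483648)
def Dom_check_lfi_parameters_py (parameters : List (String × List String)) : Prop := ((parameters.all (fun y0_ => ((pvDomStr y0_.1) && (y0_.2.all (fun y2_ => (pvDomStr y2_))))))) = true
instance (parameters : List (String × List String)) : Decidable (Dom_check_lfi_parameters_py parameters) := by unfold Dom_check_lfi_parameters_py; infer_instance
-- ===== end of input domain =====

-- B replaces A's per-name scan over all 20 keywords by a first-letter dispatch index plus a single
-- left-to-right positional prefix scan of each lowered name (alternative algorithm, same result).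


-- ===== PORT A =====
-- A: for each parameter name, test whether any of the 20 keywords is a substring of its lowercase.
def pvLfiKeywords : List String :=
  ["file", "page", "path", "include", "require", "view", "template",
   "doc", "document", "folder", "dir", "directory", "read", "load",
   "show", "display", "content", "data", "src", "source"]

def check_lfi_parameters_py (parameters : List (String × List String)) : Bool :=
  parameters.any (fun p =>
    pvLfiKeywords.any (fun keyword => PySem.Str.isIn keyword (PySem.Str.lower p.1)))

-- ===== PORT B =====
-- B: build a dict mapping a first character to the keywords starting with it (Python's one-char
-- string kw[0] is ported as the Char kw.toList.headD ' '; every keyword is nonempty), then scan each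
-- lowered name once, position by position, trying only the keywords dispatched by the current char.
def pvByFirst : PySem.Dict Char (List String) :=
  (pvLfiKeywords.map (fun kw => (kw.toList.headD ' ', kw))).foldl
    (fun d p => d.modify p.1 [] (· ++ [p.2])) PySem.Dict.empty

def check_lfi_parameters_py_alt (parameters : List (String × List String)) : Bool :=
  parameters.any (fun p =>
    let low := (PySem.Str.lower p.1).toList
    (PySem.List.enumerate low).any (fun ic =>
      (pvByFirst.getD ic.2 []).any (fun kw =>
        -- low.startswith(kw, i): exact as a prefix test on low.drop i, since enumerate
        -- yields 0 ≤ i < len(low)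
        PySem.Chars.startswith (low.drop ic.1.toNat) kw.toList)))

-- ===== PRECONDITION & SPEC =====
def Spec_check_lfi_parameters_py (parameters : List (String × List String)) (out : Bool) : Prop := out = check_lfi_parameters_py_alt parameters
instance (parameters : List (String × List String)) (out : Bool) : Decidable (Spec_check_lfi_parameters_py parameters out) := by unfold Spec_check_lfi_parameters_py; infer_instance

-- ===== CLAIM =====
def Claim_equal_check_lfi_parameters_py : Prop := ∀ (parameters : List (String × List String)), Dom_check_lfi_parameters_py parameters → Spec_check_lfi_parameters_py parameters (check_lfi_parameters_py parameters)

-- ===== LEMMAS AND PROOFS =====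

-- the dispatch index contains exactly the keywords, grouped under their first character
lemma mem_pvByFirst (c : Char) (kw : String) :
    kw ∈ pvByFirst.getD c [] ↔ kw ∈ pvLfiKeywords ∧ kw.toList.headD ' ' = c := by
  unfold pvByFirst
  rw [PySem.Dict.getD_foldl_modify_append]
  simp [List.mem_filter, List.mem_map]

lemma pvKeywords_nonempty : ∀ kw ∈ pvLfiKeywords, kw.toList ≠ [] := by
  intro kw hkw; fin_cases hkw <;> simp

-- per-name: the positional dispatch scan finds a hit iff some keyword is a substring
lemma scan_eq (cs : List Char) :
    ((PySem.List.enumerate cs).any (fun ic =>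
      (pvByFirst.getD ic.2 []).any (fun kw =>
        PySem.Chars.startswith (cs.drop ic.1.toNat) kw.toList)))
    = pvLfiKeywords.any (fun kw => PySem.Chars.isIn kw.toList cs) := by
  rw [Bool.eq_iff_iff]
  simp only [List.any_eq_true, PySem.List.mem_enumerate_iff]
  constructor
  · rintro ⟨ic, ⟨k, hk, rfl⟩, kw, hkw, hsw⟩
    obtain ⟨hmem, -⟩ := (mem_pvByFirst _ _).mp hkw
    refine ⟨kw, hmem, ?_⟩
    rw [← PySem.Chars.exists_prefix_drop_iff_isIn _ _]
    exact ⟨k, by simpa using (PySem.Chars.startswith_iff _ _).mp hsw⟩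
  · rintro ⟨kw, hkw, hin⟩
    obtain ⟨j, hpre⟩ := (PySem.Chars.exists_prefix_drop_iff_isIn _ _).mpr hin
    obtain ⟨h, t, hht⟩ : ∃ h t, kw.toList = h :: t := by
      cases hcs : kw.toList with
      | nil => exact absurd hcs (pvKeywords_nonempty kw hkw)
      | cons h t => exact ⟨h, t, rfl⟩
    obtain ⟨r, hr⟩ := hpre
    have hj : j < cs.length := by
      by_contra hge
      rw [List.drop_eq_nil_of_le (by omega)] at hr
      simp [hht] at hr
    have hdrop : cs.drop j = h :: (t ++ r) := by rw [← hr, hht]; simp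
    have hcsj : cs[j] = h := by
      have h0 : (cs.drop j)[0]'(by simp [hdrop]) = h := by simp [hdrop]
      simpa [List.getElem_drop] using h0
    refine ⟨((j : Int), cs[j]), ⟨j, hj, by simp⟩, kw, ?_, ?_⟩
    · exact (mem_pvByFirst _ _).mpr ⟨hkw, by rw [hcsj, hht]; rfl⟩
    · rw [PySem.Chars.startswith_iff _ _]
      simpa using (⟨r, hr⟩ : kw.toList <+: cs.drop j)

-- ===== VERDICT =====
theorem check_lfi_parameters_py_spec : Claim_equal_check_lfi_parameters_py := by
  intro parameters _
  unfold Spec_check_lfi_parameters_py check_lfi_parameters_py check_lfi_parameters_py_alt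
  refine congrArg _ (funext fun p => ?_)
  rw [scan_eq]
  simp [PySem.Str.isIn]
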